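-- pv_equiv track=rewrite | github.com/Sivasai517/Ai-Based-Nutrition-Analyzer | utils.py | normalize_food_name
-- ===== SOURCE A (Python) =====
-- from typing import Dict, List, Optional
--
-- def normalize_food_name(food_name: str, food_names: List[str]) -> Optional[str]:
--     """Find the closest matching food name from the database."""
--     food_name = food_name.lower()
--     # First try exact match
--     for db_food in food_names:
--         if food_name == db_food.lower():
--             return db_food
--     # Then try contains match
--     for db_food in food_names:
--         if food_name in db_food.lower() or db_food.lower() in food_name:
--             return db_food
--     return None
-- ===== SOURCE B (Python) =====
-- from typing import List, Optional
--
-- def normalize_food_name(food_name: str, food_names: List[str]) -> Optional[str]: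
--     """Single pass: return immediately on exact match; remember the first
--     contains-match as a fallback and return it (or None) after the loop."""
--     food_name = food_name.lower()
--     fallback = None
--     for db_food in food_names:
--         low = db_food.lower()
--         if food_name == low:
--             return db_food
--         if fallback is None and (food_name in low or low in food_name):
--             fallback = db_food
--     return fallback
-- ===== Notes on version B (the rewrite author's own statement) =====
-- stated objective: simpler
-- what changed: Collapses A's two sequential full scans (exact pass then contains pass) into one pass that returns immediately on an exact match and records the first contains-match in a fallback variable returned after the loop.
import Mathlib
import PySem

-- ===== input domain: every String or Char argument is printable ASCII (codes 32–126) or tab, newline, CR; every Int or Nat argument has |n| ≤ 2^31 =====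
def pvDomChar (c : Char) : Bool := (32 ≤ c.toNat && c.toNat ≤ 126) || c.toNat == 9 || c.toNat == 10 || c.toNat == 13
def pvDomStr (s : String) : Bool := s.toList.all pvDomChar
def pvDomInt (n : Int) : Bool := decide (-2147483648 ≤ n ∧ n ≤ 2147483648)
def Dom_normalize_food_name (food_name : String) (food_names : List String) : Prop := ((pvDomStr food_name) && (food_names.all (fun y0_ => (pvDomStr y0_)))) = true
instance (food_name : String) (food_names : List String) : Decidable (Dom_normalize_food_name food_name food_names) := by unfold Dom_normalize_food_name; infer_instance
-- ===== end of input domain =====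

-- B replaces A's two sequential scans by one pass with a fallback variable (objective: simpler).

-- ===== PORT A =====
-- first loop of A: first db_food whose lowercase equals food_name
def nfnExact (fn : String) : List String → Option String
  | [] => none
  | x :: xs => if fn == PySem.Str.lower x then some x else nfnExact fn xs

-- second loop of A: first db_food with a contains match either way
def nfnContains (fn : String) : List String → Option String
  | [] => none
  | x :: xs =>
      if PySem.Str.isIn fn (PySem.Str.lower x) || PySem.Str.isIn (PySem.Str.lower x) fn
      then some x else nfnContains fn xs

def normalize_food_name (food_name : String) (food_names : List String) : Option String :=
  let fn := PySem.Str.lower food_name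
  match nfnExact fn food_names with
  | some r => some r
  | none => nfnContains fn food_names

-- ===== PORT B =====
-- single pass: return on exact match, record first contains match as fallback
def nfnLoop (fn : String) (fb : Option String) : List String → Option String
  | [] => fb
  | x :: xs =>
      let low := PySem.Str.lower x
      if fn == low then some x
      else if fb.isNone && (PySem.Str.isIn fn low || PySem.Str.isIn low fn)
      then nfnLoop fn (some x) xs
      else nfnLoop fn fb xs

def normalize_food_name_alt (food_name : String) (food_names : List String) : Option String :=
  nfnLoop (PySem.Str.lower food_name) none food_names

-- ===== PRECONDITION & SPEC =====
def Spec_normalize_food_name (food_name : String) (food_names : List String) (out : Option String) : Prop := out = normalize_food_name_alt food_name food_names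
instance (food_name : String) (food_names : List String) (out : Option String) : Decidable (Spec_normalize_food_name food_name food_names out) := by unfold Spec_normalize_food_name; infer_instance

-- ===== CLAIM (what is proved, stated in full; the proofs are below) =====
def Claim_equal_normalize_food_name : Prop := ∀ (food_name : String) (food_names : List String), Dom_normalize_food_name food_name food_names → Spec_normalize_food_name food_name food_names (normalize_food_name food_name food_names)

-- ===== LEMMAS AND PROOFS =====

-- The single-pass loop equals: first exact match, else the pending fallback, else first contains match.
theorem nfnLoop_eq (fn : String) (l : List String) : ∀ (fb : Option String),
    nfnLoop fn fb l =
      match nfnExact fn l with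
      | some r => some r
      | none => match fb with
                | some v => some v
                | none => nfnContains fn l := by
  induction l with
  | nil => intro fb; cases fb <;> simp [nfnLoop, nfnExact, nfnContains]
  | cons x xs ih =>
      intro fb
      by_cases hx : fn == PySem.Str.lower x
      · simp [nfnLoop, nfnExact, hx]
      · cases fb with
        | some v =>
            simp [nfnLoop, nfnExact, hx, ih (some v)]
        | none =>
            by_cases hc : PySem.Chars.isIn fn.toList (PySem.Chars.lower x.toList) = true ∨
                PySem.Chars.isIn (PySem.Chars.lower x.toList) fn.toList = true
            · simp [nfnLoop, nfnExact, nfnContains, hx, hc, ih (some x)]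
            · simp [nfnLoop, nfnExact, nfnContains, hx, hc, ih none]

-- ===== VERDICT (by name: the statement is the Claim_ definition above) =====
theorem normalize_food_name_spec : Claim_equal_normalize_food_name := by
  intro food_name food_names _
  unfold Spec_normalize_food_name normalize_food_name normalize_food_name_alt
  rw [nfnLoop_eq]
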